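-- pv_equiv track=rewrite | github.com/Vivbhav/codechef_solutions | march19long/jain.py | chec
-- ===== SOURCE A (Python) =====
-- def chec(num1, num2):
-- 	#arr = [0] * 5
-- 	count = 0
-- 	for i in range(5):
-- 		if num1 % 2 == 1 or num2 % 2 == 1:
-- 			count += 1
-- 		num1 // 2
-- 		num2 // 2
-- 	if count == 5:
-- 		return True
-- 	else:
-- 		return False
-- ===== SOURCE B (Python) =====
-- def chec(num1, num2):
--     return num1 % 2 == 1 or num2 % 2 == 1
-- ===== Notes on version B (the rewrite author's own statement) =====
-- stated objective: simpler
-- what changed: Replaced the five-iteration counter loop (whose body never changes its operands, so the count is always 0 or 5) with a single closed-form parity disjunction.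
import Mathlib
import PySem

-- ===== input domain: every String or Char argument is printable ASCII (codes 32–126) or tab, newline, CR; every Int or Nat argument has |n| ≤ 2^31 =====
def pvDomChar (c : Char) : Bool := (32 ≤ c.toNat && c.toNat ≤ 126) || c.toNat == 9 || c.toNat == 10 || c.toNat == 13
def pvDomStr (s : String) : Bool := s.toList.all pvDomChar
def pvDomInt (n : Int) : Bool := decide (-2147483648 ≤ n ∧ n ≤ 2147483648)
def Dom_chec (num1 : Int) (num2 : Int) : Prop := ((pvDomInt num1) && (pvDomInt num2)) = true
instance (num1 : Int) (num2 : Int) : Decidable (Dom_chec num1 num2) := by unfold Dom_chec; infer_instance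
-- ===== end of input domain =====

-- B replaces A's five redundant parity-test iterations with one closed-form parity disjunction (simpler).


-- ===== PORT A =====
-- literal port of A: fold over range(5), incrementing count when either operand is odd;
-- the discarded 'num1 // 2' / 'num2 // 2' expressions have no effect and vanish in the port
def chec (num1 : Int) (num2 : Int) : Bool :=
  let count : Int :=
    (PySem.List.pyRange 0 5 1).foldl
      (fun count _i =>
        if PySem.Int.mod num1 2 = 1 ∨ PySem.Int.mod num2 2 = 1 then count + 1 else count) 0
  if count = 5 then true else false

-- ===== PORT B =====
-- B: closed-form parity disjunction
def chec_alt (num1 : Int) (num2 : Int) : Bool :=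
  decide (PySem.Int.mod num1 2 = 1 ∨ PySem.Int.mod num2 2 = 1)

-- ===== PRECONDITION & SPEC =====
def Spec_chec (num1 : Int) (num2 : Int) (out : Bool) : Prop := out = chec_alt num1 num2
instance (num1 : Int) (num2 : Int) (out : Bool) : Decidable (Spec_chec num1 num2 out) := by unfold Spec_chec; infer_instance

-- ===== CLAIM (what is proved, stated in full; the proofs are below) =====
def Claim_equal_chec : Prop := ∀ (num1 : Int) (num2 : Int), Dom_chec num1 num2 → Spec_chec num1 num2 (chec num1 num2)

-- ===== LEMMAS AND PROOFS =====

-- ===== VERDICT (by name: the statement is the Claim_ definition above) =====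
theorem chec_spec : Claim_equal_chec := by
  intro num1 num2 _
  unfold Spec_chec chec chec_alt
  by_cases h : Int.fmod num1 2 = 1 ∨ Int.fmod num2 2 = 1 <;>
    simp [PySem.List.pyRange, List.range_succ, PySem.Int.mod, h]
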